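-- pv_equiv track=rewrite | github.com/mike-homelab/homelab-k8s-platform | images/ai-platform/tools/docs-ingestor/src/main.py | _prioritize_urls_by_keywords
-- ===== SOURCE A (Python) =====
-- def _prioritize_urls_by_keywords(urls: list[str], keywords: list[str]) -> list[str]:
--     if not keywords:
--         return urls
--     hi: list[str] = []
--     lo: list[str] = []
--     for u in urls:
--         lu = u.lower()
--         if any(k in lu for k in keywords):
--             hi.append(u)
--         else:
--             lo.append(u)
--     return hi + lo
-- ===== SOURCE B (Python) =====
-- def _prioritize_urls_by_keywords(urls: list[str], keywords: list[str]) -> list[str]: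
--     if not keywords:
--         return urls
--     return sorted(urls, key=lambda u: not any(k in u.lower() for k in keywords))
-- ===== Notes on version B (the rewrite author's own statement) =====
-- stated objective: simpler
-- what changed: Replaces the explicit two-bucket partition loop with a single stable sort keyed on the boolean non-matching predicate, relying on sort stability to keep matching URLs first and each group's relative order.
import Mathlib
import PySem

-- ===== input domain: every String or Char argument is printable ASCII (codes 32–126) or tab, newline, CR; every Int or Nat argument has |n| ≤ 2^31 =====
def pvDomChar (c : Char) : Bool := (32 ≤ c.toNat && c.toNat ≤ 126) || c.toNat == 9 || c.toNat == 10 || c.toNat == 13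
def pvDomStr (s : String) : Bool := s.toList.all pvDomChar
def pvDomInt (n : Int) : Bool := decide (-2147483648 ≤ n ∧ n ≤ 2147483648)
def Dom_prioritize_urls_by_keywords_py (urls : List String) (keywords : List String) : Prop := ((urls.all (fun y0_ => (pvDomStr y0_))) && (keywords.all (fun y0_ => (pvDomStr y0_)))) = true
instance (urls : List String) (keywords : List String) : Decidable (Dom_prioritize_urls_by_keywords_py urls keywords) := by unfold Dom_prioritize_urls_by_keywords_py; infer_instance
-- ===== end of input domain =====

-- B replaces A's explicit two-bucket partition loop by one stable sort on the boolean
-- non-matching key (objective: simpler).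

-- ===== PORT A =====
-- the membership test 'any(k in lu for k in keywords)' of the Python
def pvMatches (keywords : List String) (lu : String) : Bool :=
  keywords.any (fun k => PySem.Str.isIn k lu)

def prioritize_urls_by_keywords_py (urls : List String) (keywords : List String) : List String :=
  if keywords = [] then urls
  else
    let st := urls.foldl
      (fun (st : List String × List String) u =>
        let lu := PySem.Str.lower u
        if pvMatches keywords lu then (st.1 ++ [u], st.2) else (st.1, st.2 ++ [u]))
      ([], [])
    st.1 ++ st.2

-- ===== PORT B =====
def prioritize_urls_by_keywords_py_alt (urls : List String) (keywords : List String) : List String :=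
  if keywords = [] then urls
  else PySem.List.sorted urls (fun u => !(pvMatches keywords (PySem.Str.lower u))) false

-- ===== PRECONDITION & SPEC =====
def Spec_prioritize_urls_by_keywords_py (urls : List String) (keywords : List String) (out : List String) : Prop := out = prioritize_urls_by_keywords_py_alt urls keywords
instance (urls : List String) (keywords : List String) (out : List String) : Decidable (Spec_prioritize_urls_by_keywords_py urls keywords out) := by unfold Spec_prioritize_urls_by_keywords_py; infer_instance

-- ===== CLAIM (what is proved, stated in full; the proofs are below) =====
def Claim_equal_prioritize_urls_by_keywords_py : Prop := ∀ (urls : List String) (keywords : List String), Dom_prioritize_urls_by_keywords_py urls keywords → Spec_prioritize_urls_by_keywords_py urls keywords (prioritize_urls_by_keywords_py urls keywords)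

-- ===== LEMMAS AND PROOFS =====

-- inserting a key-false element into (all-false F ++ all-true T) puts it between the zones
theorem insertBy_false_zone {α : Type} (key : α → Bool) (x : α) (F T : List α)
    (hx : key x = false)
    (hF : ∀ y ∈ F, key y = false) (hT : ∀ y ∈ T, key y = true) :
    PySem.List.insertBy (fun a b => decide (key a < key b)) x (F ++ T) = F ++ x :: T := by
  induction F with
  | nil =>
      simp only [List.nil_append]
      cases T with
      | nil => simp [PySem.List.insertBy]
      | cons y ys =>
          have hy := hT y (by simp)
          simp [PySem.List.insertBy, hx, hy, Bool.lt_iff]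
  | cons a F ih =>
      have ha := hF a (by simp)
      have hcond : decide (key x < key a) = false := by simp [hx, ha]
      simp only [List.cons_append, PySem.List.insertBy, hcond, Bool.false_eq_true,
        if_false]
      simp [ih (fun y hy => hF y (by simp [hy]))]

-- inserting a key-true element appends it at the end
theorem insertBy_true_end {α : Type} (key : α → Bool) (x : α) (ys : List α)
    (hx : key x = true) :
    PySem.List.insertBy (fun a b => decide (key a < key b)) x ys = ys ++ [x] := by
  apply PySem.List.insertBy_of_forall_not_before
  intro y hy
  simp [hx, Bool.lt_iff]

-- stable insertion sort on a boolean key is the stable partition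
theorem foldl_insertBy_bool {α : Type} (key : α → Bool) (xs F T : List α)
    (hF : ∀ y ∈ F, key y = false) (hT : ∀ y ∈ T, key y = true) :
    xs.foldl (fun acc x => PySem.List.insertBy (fun a b => decide (key a < key b)) x acc) (F ++ T)
      = (F ++ xs.filter (fun x => !(key x))) ++ (T ++ xs.filter key) := by
  induction xs generalizing F T with
  | nil => simp
  | cons x xs ih =>
      simp only [List.foldl_cons, List.filter_cons]
      cases hx : key x with
      | false =>
          rw [insertBy_false_zone key x F T hx hF hT]
          have : F ++ x :: T = (F ++ [x]) ++ T := by simp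
          rw [this, ih (F ++ [x]) T
            (by intro y hy; rcases List.mem_append.mp hy with h | h
                · exact hF y h
                · simp at h; simpa [h] using hx) hT]
          simp
      | true =>
          rw [show F ++ T = F ++ T from rfl, insertBy_true_end key x (F ++ T) hx]
          have : (F ++ T) ++ [x] = F ++ (T ++ [x]) := by simp
          rw [this, ih F (T ++ [x]) hF
            (by intro y hy; rcases List.mem_append.mp hy with h | h
                · exact hT y h
                · simp at h; simpa [h] using hx)]
          simp

theorem sorted_bool_key {α : Type} (key : α → Bool) (xs : List α) :
    PySem.List.sorted xs key false
      = xs.filter (fun x => !(key x)) ++ xs.filter key := by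
  rw [PySem.List.sorted_eq_foldl_insertBy]
  have := foldl_insertBy_bool key xs [] []
    (by intro y hy; simp at hy) (by intro y hy; simp at hy)
  simpa using this

-- A's accumulator loop is the pair of filters
theorem foldl_partition (keywords : List String) (urls : List String)
    (hi lo : List String) :
    urls.foldl
      (fun (st : List String × List String) u =>
        let lu := PySem.Str.lower u
        if pvMatches keywords lu then (st.1 ++ [u], st.2) else (st.1, st.2 ++ [u]))
      (hi, lo)
      = (hi ++ urls.filter (fun u => pvMatches keywords (PySem.Str.lower u)),
         lo ++ urls.filter (fun u => !(pvMatches keywords (PySem.Str.lower u)))) := by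
  induction urls generalizing hi lo with
  | nil => simp
  | cons u urls ih =>
      simp only [List.foldl_cons, List.filter_cons]
      cases hu : pvMatches keywords (PySem.Str.lower u) with
      | false =>
          simp only [Bool.false_eq_true, if_false, Bool.not_false, if_true]
          rw [ih]; simp
      | true =>
          simp only [if_true, Bool.not_true, Bool.false_eq_true, if_false]
          rw [ih]; simp

-- ===== VERDICT (by name: the statement is the Claim_ definition above) =====
theorem prioritize_urls_by_keywords_py_spec : Claim_equal_prioritize_urls_by_keywords_py := by
  intro urls keywords _
  unfold Spec_prioritize_urls_by_keywords_py prioritize_urls_by_keywords_py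
    prioritize_urls_by_keywords_py_alt
  by_cases hk : keywords = []
  · simp [hk]
  · simp only [if_neg hk]
    rw [sorted_bool_key (fun u => !(pvMatches keywords (PySem.Str.lower u))) urls]
    simp only [foldl_partition keywords urls [] []]
    simp [Bool.not_not]
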